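-- pv_equiv track=rewrite | github.com/chrisworsey55/atlas | autoresearch/brinson_attribution.py | get_agent_layer
-- ===== SOURCE A (Python) =====
-- LAYER_1_AGENTS = ["news", "news_sentiment", "flow", "institutional_flow"]
--
-- LAYER_2_AGENTS = [
--     "bond", "bond_desk", "currency", "currency_desk", "commodities", "commodities_desk",
--     "metals", "metals_desk", "semiconductor", "semi_desk", "biotech", "biotech_desk",
--     "energy", "energy_desk", "consumer", "consumer_desk", "industrials", "industrials_desk",
--     "microcap", "microcap_desk"
-- ]
--
-- LAYER_3_AGENTS = ["druckenmiller", "aschenbrenner", "baker", "ackman"]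
--
-- LAYER_4_AGENTS = ["cro", "alpha", "alpha_discovery", "autonomous", "autonomous_execution", "cio"]
--
-- def get_agent_layer(agent_name: str) -> int:
--     """Return the layer number (1-4) for an agent."""
--     agent_lower = agent_name.lower().replace("_desk", "").replace("_agent", "")
--     if agent_lower in [a.lower().replace("_desk", "").replace("_agent", "") for a in LAYER_1_AGENTS]:
--         return 1
--     elif agent_lower in [a.lower().replace("_desk", "").replace("_agent", "") for a in LAYER_2_AGENTS]:
--         return 2
--     elif agent_lower in LAYER_3_AGENTS:
--         return 3
--     elif agent_lower in [a.lower() for a in LAYER_4_AGENTS]: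
--         return 4
--     return 0
-- ===== SOURCE B (Python) =====
-- LAYER_1_AGENTS = ["news", "news_sentiment", "flow", "institutional_flow"]
--
-- LAYER_2_AGENTS = [
--     "bond", "bond_desk", "currency", "currency_desk", "commodities", "commodities_desk",
--     "metals", "metals_desk", "semiconductor", "semi_desk", "biotech", "biotech_desk",
--     "energy", "energy_desk", "consumer", "consumer_desk", "industrials", "industrials_desk",
--     "microcap", "microcap_desk"
-- ]
--
-- LAYER_3_AGENTS = ["druckenmiller", "aschenbrenner", "baker", "ackman"]
--
-- LAYER_4_AGENTS = ["cro", "alpha", "alpha_discovery", "autonomous", "autonomous_execution", "cio"]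
--
--
-- def _norm(s: str) -> str:
--     return s.lower().replace("_desk", "").replace("_agent", "")
--
--
-- # One flat table of (normalized name, layer) pairs, each layer normalized by its own rule.
-- _TABLE = (
--     [(_norm(a), 1) for a in LAYER_1_AGENTS]
--     + [(_norm(a), 2) for a in LAYER_2_AGENTS]
--     + [(a, 3) for a in LAYER_3_AGENTS]
--     + [(a.lower(), 4) for a in LAYER_4_AGENTS]
-- )
--
--
-- def get_agent_layer(agent_name: str) -> int:
--     """Return the layer number (1-4) for an agent."""
--     key = _norm(agent_name)
--     best = 0
--     for name, layer in _TABLE: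
--         if name == key and (best == 0 or layer < best):
--             best = layer
--     return best
-- ===== Notes on version B (the rewrite author's own statement) =====
-- stated objective: alternative
-- what changed: Replaced A's four staged normalized-membership scans with early returns by one flat precomputed (normalized name, layer) table traversed in a single loop that keeps the minimum matching layer in an accumulator (precedence 1>2>3>4 = minimum over matches, 0 if none).
import Mathlib
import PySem

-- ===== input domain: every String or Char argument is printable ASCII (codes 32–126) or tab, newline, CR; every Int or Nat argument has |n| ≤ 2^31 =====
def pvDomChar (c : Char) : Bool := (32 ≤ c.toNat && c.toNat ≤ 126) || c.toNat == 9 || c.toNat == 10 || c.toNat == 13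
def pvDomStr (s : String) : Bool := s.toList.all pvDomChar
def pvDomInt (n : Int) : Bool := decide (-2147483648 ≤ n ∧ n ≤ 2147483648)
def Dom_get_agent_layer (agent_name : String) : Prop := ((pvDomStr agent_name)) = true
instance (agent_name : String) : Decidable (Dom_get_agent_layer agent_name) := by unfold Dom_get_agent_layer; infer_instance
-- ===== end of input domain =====

-- B replaces A's four staged membership scans (early-return chain) by a single pass over one
-- flat precomputed (normalized name, layer) table keeping the minimum matching layer (alternative decomposition).

-- ===== PORT A =====
def LAYER_1_AGENTS : List String := ["news", "news_sentiment", "flow", "institutional_flow"]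

def LAYER_2_AGENTS : List String :=
  ["bond", "bond_desk", "currency", "currency_desk", "commodities", "commodities_desk",
   "metals", "metals_desk", "semiconductor", "semi_desk", "biotech", "biotech_desk",
   "energy", "energy_desk", "consumer", "consumer_desk", "industrials", "industrials_desk",
   "microcap", "microcap_desk"]

def LAYER_3_AGENTS : List String := ["druckenmiller", "aschenbrenner", "baker", "ackman"]

def LAYER_4_AGENTS : List String := ["cro", "alpha", "alpha_discovery", "autonomous", "autonomous_execution", "cio"]

def get_agent_layer (agent_name : String) : Int :=
  let agent_lower := PySem.Str.replace (PySem.Str.replace (PySem.Str.lower agent_name) "_desk" "") "_agent" ""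
  if (LAYER_1_AGENTS.map (fun a => PySem.Str.replace (PySem.Str.replace (PySem.Str.lower a) "_desk" "") "_agent" "")).contains agent_lower then 1
  else if (LAYER_2_AGENTS.map (fun a => PySem.Str.replace (PySem.Str.replace (PySem.Str.lower a) "_desk" "") "_agent" "")).contains agent_lower then 2
  else if LAYER_3_AGENTS.contains agent_lower then 3
  else if (LAYER_4_AGENTS.map (fun a => PySem.Str.lower a)).contains agent_lower then 4
  else 0

-- ===== PORT B =====
def pvNorm (s : String) : String :=
  PySem.Str.replace (PySem.Str.replace (PySem.Str.lower s) "_desk" "") "_agent" ""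

-- one flat table of (normalized name, layer) pairs, each layer normalized by its own rule
def pvTable : List (String × Int) :=
  (LAYER_1_AGENTS.map (fun a => (pvNorm a, (1 : Int))))
    ++ (LAYER_2_AGENTS.map (fun a => (pvNorm a, (2 : Int))))
    ++ (LAYER_3_AGENTS.map (fun a => (a, (3 : Int))))
    ++ (LAYER_4_AGENTS.map (fun a => (PySem.Str.lower a, (4 : Int))))

-- the loop body of B: keep the smallest matching layer (0 = nothing found yet)
def pvStep (key : String) (best : Int) (p : String × Int) : Int :=
  if p.1 == key && (best == 0 || decide (p.2 < best)) then p.2 else best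

def get_agent_layer_alt (agent_name : String) : Int :=
  let key := pvNorm agent_name
  pvTable.foldl (pvStep key) 0

-- ===== PRECONDITION & SPEC =====
def Spec_get_agent_layer (agent_name : String) (out : Int) : Prop := out = get_agent_layer_alt agent_name
instance (agent_name : String) (out : Int) : Decidable (Spec_get_agent_layer agent_name out) := by unfold Spec_get_agent_layer; infer_instance

-- ===== CLAIM (what is proved, stated in full; the proofs are below) =====
def Claim_equal_get_agent_layer : Prop := ∀ (agent_name : String), Dom_get_agent_layer agent_name → Spec_get_agent_layer agent_name (get_agent_layer agent_name)

-- ===== LEMMAS AND PROOFS =====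
-- the accumulator never changes on a block of constant layer v once best = b ≠ 0 with b ≤ v
lemma foldl_step_stay (key : String) {α : Type} (l : List α) (g : α → String) (v : Int)
    (b : Int) (hb : b ≠ 0) (hv : ¬ v < b) :
    (l.map (fun a => (g a, v))).foldl (pvStep key) b = b := by
  induction l with
  | nil => rfl
  | cons a l ih =>
      simp only [List.map_cons, List.foldl_cons, pvStep]
      rw [if_neg, ih]
      simp [hb, hv]

-- a block of constant layer v ≠ 0, folded from 0: v on a key hit anywhere, else 0
lemma foldl_step_block (key : String) {α : Type} (l : List α) (g : α → String) (v : Int)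
    (hv : v ≠ 0) :
    (l.map (fun a => (g a, v))).foldl (pvStep key) 0 =
      if (l.map g).contains key then v else 0 := by
  induction l with
  | nil => rfl
  | cons a l ih =>
      simp only [List.map_cons, List.foldl_cons, List.contains_cons]
      by_cases h : g a = key
      · rw [show pvStep key 0 (g a, v) = v by simp [pvStep, h]]
        rw [foldl_step_stay key l g v v hv (by omega)]
        simp [h]
      · rw [show pvStep key 0 (g a, v) = 0 by simp [pvStep, h]]
        rw [ih]
        have h' : ¬ key = g a := fun hc => h hc.symm
        simp [h']

-- ===== VERDICT (by name: the statement is the Claim_ definition above) =====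
theorem get_agent_layer_spec : Claim_equal_get_agent_layer := by
  intro s _
  unfold Spec_get_agent_layer get_agent_layer get_agent_layer_alt pvTable
  rw [show (fun a => PySem.Str.replace (PySem.Str.replace (PySem.Str.lower a) "_desk" "") "_agent" "") = pvNorm from rfl]
  rw [show (fun a => PySem.Str.lower a) = PySem.Str.lower from rfl]
  rw [show PySem.Str.replace (PySem.Str.replace (PySem.Str.lower s) "_desk" "") "_agent" "" = pvNorm s from rfl]
  set key := pvNorm s with hkey
  simp only [List.foldl_append]
  rw [show (LAYER_3_AGENTS.map (fun a => (a, (3:Int)))) = LAYER_3_AGENTS.map (fun a => (id a, (3:Int))) from rfl]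
  rw [foldl_step_block key LAYER_1_AGENTS pvNorm 1 (by norm_num)]
  by_cases h1 : (LAYER_1_AGENTS.map pvNorm).contains key
  · rw [if_pos h1, if_pos h1]
    rw [foldl_step_stay key LAYER_2_AGENTS pvNorm 2 1 (by norm_num) (by norm_num)]
    rw [foldl_step_stay key LAYER_3_AGENTS id 3 1 (by norm_num) (by norm_num)]
    rw [foldl_step_stay key LAYER_4_AGENTS PySem.Str.lower 4 1 (by norm_num) (by norm_num)]
  · rw [if_neg h1, if_neg h1]
    rw [foldl_step_block key LAYER_2_AGENTS pvNorm 2 (by norm_num)]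
    by_cases h2 : (LAYER_2_AGENTS.map pvNorm).contains key
    · rw [if_pos h2, if_pos h2]
      rw [foldl_step_stay key LAYER_3_AGENTS id 3 2 (by norm_num) (by norm_num)]
      rw [foldl_step_stay key LAYER_4_AGENTS PySem.Str.lower 4 2 (by norm_num) (by norm_num)]
    · rw [if_neg h2, if_neg h2]
      rw [foldl_step_block key LAYER_3_AGENTS id 3 (by norm_num)]
      by_cases h3 : (LAYER_3_AGENTS.map id).contains key
      · rw [if_pos h3, if_pos (by simpa using h3),
            foldl_step_stay key LAYER_4_AGENTS PySem.Str.lower 4 3 (by norm_num) (by norm_num)]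
      · rw [if_neg h3, if_neg (by simpa using h3),
            foldl_step_block key LAYER_4_AGENTS PySem.Str.lower 4 (by norm_num)]
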